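-- pv_equiv track=rewrite | github.com/pypi-data/pypi-mirror-385 | packages/speakub/speakub-1.1.37-py3-none-any.whl/speakub/core/epub/path_resolver.py | find_in_zip_by_basename
-- ===== SOURCE A (Python) =====
-- from typing import List, Optional
--
-- def find_in_zip_by_basename(basename: str, zip_namelist: List[str]) -> Optional[str]:
--     if not basename:
--         return None
--     base_lower = basename.lower()
--     # first try exact matches
--     for name in zip_namelist:
--         if name == basename:
--             return name
--     # then try endswith match (case-insensitive)
--     for name in zip_namelist:
--         if name.lower().endswith("/" + base_lower) or name.lower().endswith(base_lower):
--             return name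
--     return None
-- ===== SOURCE B (Python) =====
-- def find_in_zip_by_basename(basename, zip_namelist):
--     if not basename:
--         return None
--     base_lower = basename.lower()
--     candidate = None
--     for name in zip_namelist:
--         if name == basename:
--             return name
--         if candidate is None and name.lower().endswith(base_lower):
--             candidate = name
--     return candidate
-- ===== Notes on version B (the rewrite author's own statement) =====
-- stated objective: faster
-- what changed: Replaces A's two sequential scans (exact pass, then suffix pass) with a single pass that returns on an exact match and records the first case-insensitive suffix match as a candidate, and drops A's redundant endswith('/'+base_lower) test (subsumed by endswith(base_lower)), avoiding a per-element string concatenation and a second lower() scan.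
import Mathlib
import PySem

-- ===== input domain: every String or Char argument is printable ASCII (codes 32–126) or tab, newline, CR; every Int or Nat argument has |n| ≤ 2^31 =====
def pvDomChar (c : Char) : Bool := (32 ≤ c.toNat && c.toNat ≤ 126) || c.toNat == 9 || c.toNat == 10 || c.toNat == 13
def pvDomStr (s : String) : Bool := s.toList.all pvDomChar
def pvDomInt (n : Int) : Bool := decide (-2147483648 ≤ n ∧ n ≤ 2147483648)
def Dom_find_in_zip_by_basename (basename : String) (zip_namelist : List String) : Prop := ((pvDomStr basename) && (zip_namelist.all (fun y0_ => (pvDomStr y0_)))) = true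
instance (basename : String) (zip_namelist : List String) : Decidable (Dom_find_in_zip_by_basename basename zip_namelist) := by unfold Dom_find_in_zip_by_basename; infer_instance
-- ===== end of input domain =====

-- B folds A's two sequential scans into one pass keeping the first suffix match as a candidate,
-- dropping the redundant endswith('/'+base_lower) test (subsumed by endswith(base_lower)); objective: simpler.


-- ===== PORT A =====
-- first loop of A: exact match
def pvExactLoop (basename : String) : List String → Option String
  | [] => none
  | n :: rest => if n = basename then some n else pvExactLoop basename rest

-- second loop of A: case-insensitive suffix match (with A's two-test disjunction)
def pvSuffixLoop (base_lower : String) : List String → Option String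
  | [] => none
  | n :: rest =>
    if PySem.Str.endswith (PySem.Str.lower n) ("/" ++ base_lower)
       || PySem.Str.endswith (PySem.Str.lower n) base_lower
    then some n else pvSuffixLoop base_lower rest

def find_in_zip_by_basename (basename : String) (zip_namelist : List String) : Option String :=
  if basename = "" then none
  else
    let base_lower := PySem.Str.lower basename
    match pvExactLoop basename zip_namelist with
    | some n => some n
    | none => pvSuffixLoop base_lower zip_namelist

-- ===== PORT B =====
-- single pass: return on exact match, remember the first case-insensitive suffix match
def pvAltLoop (basename base_lower : String) (candidate : Option String) : List String → Option String
  | [] => candidate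
  | n :: rest =>
    if n = basename then some n
    else
      pvAltLoop basename base_lower
        (if candidate.isNone && PySem.Str.endswith (PySem.Str.lower n) base_lower
         then some n else candidate) rest

def find_in_zip_by_basename_alt (basename : String) (zip_namelist : List String) : Option String :=
  if basename = "" then none
  else pvAltLoop basename (PySem.Str.lower basename) none zip_namelist

-- ===== PRECONDITION & SPEC =====
def Spec_find_in_zip_by_basename (basename : String) (zip_namelist : List String) (out : Option String) : Prop := out = find_in_zip_by_basename_alt basename zip_namelist
instance (basename : String) (zip_namelist : List String) (out : Option String) : Decidable (Spec_find_in_zip_by_basename basename zip_namelist out) := by unfold Spec_find_in_zip_by_basename; infer_instance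

-- ===== CLAIM (what is proved, stated in full; the proofs are below) =====
def Claim_equal_find_in_zip_by_basename : Prop := ∀ (basename : String) (zip_namelist : List String), Dom_find_in_zip_by_basename basename zip_namelist → Spec_find_in_zip_by_basename basename zip_namelist (find_in_zip_by_basename basename zip_namelist)

-- ===== LEMMAS AND PROOFS =====

-- A's "endswith ('/'++bl)" test is subsumed by "endswith bl"
theorem pv_slash_subsumed (s bl : List Char) (h : PySem.Chars.endswith s ('/' :: bl) = true) :
    PySem.Chars.endswith s bl = true := by
  rw [PySem.Chars.endswith_iff] at h ⊢
  exact (List.suffix_cons '/' bl).trans h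

theorem pvAltLoop_eq (basename bl : String) (l : List String) (cand : Option String) :
    pvAltLoop basename bl cand l =
      match pvExactLoop basename l with
      | some n => some n
      | none =>
        match cand with
        | some c => some c
        | none => pvSuffixLoop bl l := by
  induction l generalizing cand with
  | nil => cases cand <;> simp [pvAltLoop, pvExactLoop, pvSuffixLoop]
  | cons n rest ih =>
    by_cases hb : n = basename
    · simp [pvAltLoop, pvExactLoop, hb]
    · simp only [pvAltLoop, pvExactLoop, if_neg hb]
      rw [ih]
      cases hrest : pvExactLoop basename rest with
      | some m => simp
      | none =>
        cases cand with
        | some c => simp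
        | none =>
          by_cases hew : PySem.Chars.endswith (PySem.Chars.lower n.toList) bl.toList = true
          · simp [hew, pvSuffixLoop]
          · have hslash : ¬ PySem.Chars.endswith (PySem.Chars.lower n.toList) ('/' :: bl.toList) = true :=
              fun hc => hew (pv_slash_subsumed _ _ hc)
            simp [hew, pvSuffixLoop, hslash]

-- ===== VERDICT (by name: the statement is the Claim_ definition above) =====
theorem find_in_zip_by_basename_spec : Claim_equal_find_in_zip_by_basename := by
  intro basename zip_namelist _
  unfold Spec_find_in_zip_by_basename find_in_zip_by_basename find_in_zip_by_basename_alt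
  by_cases hb : basename = ""
  · simp [hb]
  · simp only [if_neg hb]
    rw [pvAltLoop_eq]
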